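-- pv_equiv track=rewrite | github.com/AaronJai/UniProjects | CITS3001 Advanced Algorithms/Project/FIND.py | find
-- ===== SOURCE A (Python) =====
-- def find(n, jenny_answers, correct_answers):
--
--     # initialise initial score
--     initial_score = 0
--     for i in range(n):
--         if jenny_answers[i] == correct_answers[i]:
--             initial_score += 1
--
--     # Initialize max score
--     max_score = initial_score
--
--     for original_answer in 'ABCDE':
--         for new_answer in 'ABCDE':
--             if original_answer == new_answer:
--                 continue
--
--             new_score = initial_score
--
--             for i in range(n):
--                 if jenny_answers[i] == original_answer and correct_answers[i] == new_answer:
--                     new_score += 1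
--
--                 if jenny_answers[i] == original_answer and correct_answers[i] == original_answer:
--                     new_score -= 1
--
--             max_score = max(max_score, new_score)
--
--     return max_score
-- ===== SOURCE B (Python) =====
-- def find(n, jenny_answers, correct_answers):
--     # one pass: overall score + a table of (jenny, correct) pair counts,
--     # then evaluate the 20 possible global swaps from the table
--     initial = 0
--     counts = {}
--     for i in range(n):
--         j = jenny_answers[i]
--         c = correct_answers[i]
--         if j == c:
--             initial += 1
--         counts[(j, c)] = counts.get((j, c), 0) + 1
--     best = initial
--     for o in 'ABCDE':
--         loss = counts.get((o, o), 0)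
--         for w in 'ABCDE':
--             if w != o:
--                 best = max(best, initial + counts.get((o, w), 0) - loss)
--     return best
-- ===== Notes on version B (the rewrite author's own statement) =====
-- stated objective: faster
-- what changed: Instead of rescanning all n answers for each of the 20 swap pairs, B makes one pass building the overall score and a (jenny,correct) pair-count table, then evaluates every swap from the table in O(1).
import Mathlib
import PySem

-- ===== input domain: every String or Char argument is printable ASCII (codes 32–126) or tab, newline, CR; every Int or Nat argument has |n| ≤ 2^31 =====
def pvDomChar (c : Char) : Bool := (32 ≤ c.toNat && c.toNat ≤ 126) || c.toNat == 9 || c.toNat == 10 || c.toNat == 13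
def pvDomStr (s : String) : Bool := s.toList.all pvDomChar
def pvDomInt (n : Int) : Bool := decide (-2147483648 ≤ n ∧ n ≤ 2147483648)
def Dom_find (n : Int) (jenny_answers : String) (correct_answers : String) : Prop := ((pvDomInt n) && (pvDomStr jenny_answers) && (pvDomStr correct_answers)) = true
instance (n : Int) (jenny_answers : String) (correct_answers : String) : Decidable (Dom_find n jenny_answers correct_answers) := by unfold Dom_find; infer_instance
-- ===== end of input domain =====

-- B replaces A's per-swap rescan of the answers by one pass building a (jenny,correct)
-- pair-count table, then evaluates the 20 swaps from the table (objective: faster, constant factor).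

-- ===== PORT A =====
def find (n : Int) (jenny_answers : String) (correct_answers : String) : Int :=
  let jl := jenny_answers.toList
  let cl := correct_answers.toList
  -- initial score
  let initial_score : Int :=
    (PySem.List.pyRange 0 n 1).foldl
      (fun acc i => if PySem.List.pyGetD jl i ' ' = PySem.List.pyGetD cl i ' ' then acc + 1 else acc) 0
  -- try every ordered pair of distinct answers, rescanning the answers each time
  "ABCDE".toList.foldl (fun max_score original_answer =>
    "ABCDE".toList.foldl (fun max_score new_answer =>
      if original_answer = new_answer then max_score
      else
        let new_score :=
          (PySem.List.pyRange 0 n 1).foldl (fun acc i =>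
            let acc := if PySem.List.pyGetD jl i ' ' = original_answer ∧ PySem.List.pyGetD cl i ' ' = new_answer then acc + 1 else acc
            if PySem.List.pyGetD jl i ' ' = original_answer ∧ PySem.List.pyGetD cl i ' ' = original_answer then acc - 1 else acc)
            initial_score
        max max_score new_score) max_score) initial_score

-- ===== PORT B =====
def find_alt (n : Int) (jenny_answers : String) (correct_answers : String) : Int :=
  let jl := jenny_answers.toList
  let cl := correct_answers.toList
  -- one pass: overall score and pair-count table
  let st :=
    (PySem.List.pyRange 0 n 1).foldl
      (fun (st : Int × PySem.Dict (Char × Char) Int) i =>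
        let j := PySem.List.pyGetD jl i ' '
        let c := PySem.List.pyGetD cl i ' '
        let initial := if j = c then st.1 + 1 else st.1
        (initial, st.2.insert (j, c) (st.2.getD (j, c) 0 + 1)))
      (0, PySem.Dict.empty)
  let initial := st.1
  let counts := st.2
  -- evaluate every swap from the table
  "ABCDE".toList.foldl (fun best o =>
    let loss := counts.getD (o, o) 0
    "ABCDE".toList.foldl (fun best w =>
      if w ≠ o then max best (initial + counts.getD (o, w) 0 - loss) else best) best) initial

-- ===== PRECONDITION & SPEC =====
-- A indexes both strings at 0..n-1, so it raises IndexError when n exceeds either length.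
def Pre_find (n : Int) (jenny_answers : String) (correct_answers : String) : Prop :=
  n ≤ (jenny_answers.toList.length : Int) ∧ n ≤ (correct_answers.toList.length : Int)
instance (n : Int) (jenny_answers : String) (correct_answers : String) : Decidable (Pre_find n jenny_answers correct_answers) := by unfold Pre_find; infer_instance
def pvWitness_find : Int × String × String := (2, "AB", "AC")

def Spec_find (n : Int) (jenny_answers : String) (correct_answers : String) (out : Int) : Prop := out = find_alt n jenny_answers correct_answers
instance (n : Int) (jenny_answers : String) (correct_answers : String) (out : Int) : Decidable (Spec_find n jenny_answers correct_answers out) := by unfold Spec_find; infer_instance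

-- ===== CLAIM (what is proved, stated in full; the proofs are below) =====
def Claim_equal_find : Prop := ∀ (n : Int) (jenny_answers : String) (correct_answers : String), Dom_find n jenny_answers correct_answers → Pre_find n jenny_answers correct_answers → Spec_find n jenny_answers correct_answers (find n jenny_answers correct_answers)

-- ===== LEMMAS AND PROOFS =====

-- A's inner rescan computes initial + #{i | pair i = (o,w)} - #{i | pair i = (o,o)}
theorem pv_innerA (jget cget : Int → Char) (o w : Char) (l : List Int) (s : Int) :
    l.foldl (fun acc i =>
        if jget i = o ∧ cget i = o then
          (if jget i = o ∧ cget i = w then acc + 1 else acc) - 1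
        else (if jget i = o ∧ cget i = w then acc + 1 else acc)) s
    = s + ((l.map fun i => (jget i, cget i)).count (o, w) : Int)
        - ((l.map fun i => (jget i, cget i)).count (o, o) : Int) := by
  induction l generalizing s with
  | nil => simp
  | cons x xs ih =>
    simp only [List.foldl_cons, List.map_cons, List.count_cons, ih]
    simp only [beq_iff_eq, Prod.mk.injEq]
    split_ifs <;> push_cast <;> omega

-- B's single pass splits into its two independent components
theorem pv_pairFold (f : Int → Int → Int) (g : PySem.Dict (Char × Char) Int → Int → PySem.Dict (Char × Char) Int)
    (l : List Int) (a : Int) (d : PySem.Dict (Char × Char) Int) :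
    l.foldl (fun (st : Int × PySem.Dict (Char × Char) Int) i => (f st.1 i, g st.2 i)) (a, d)
    = (l.foldl f a, l.foldl g d) := by
  induction l generalizing a d with
  | nil => rfl
  | cons x xs ih => simp [List.foldl_cons, ih]

-- B's count-table fold over indices, read back as a pair count
theorem pv_countTable (jget cget : Int → Char) (l : List Int) (p : Char × Char) :
    (l.foldl (fun (d : PySem.Dict (Char × Char) Int) i =>
        d.insert (jget i, cget i) (d.getD (jget i, cget i) 0 + 1)) PySem.Dict.empty).getD p 0
    = ((l.map fun i => (jget i, cget i)).count p : Int) := by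
  have h : l.foldl (fun (d : PySem.Dict (Char × Char) Int) i =>
        d.insert (jget i, cget i) (d.getD (jget i, cget i) 0 + 1)) PySem.Dict.empty
      = (l.map fun i => (jget i, cget i)).foldl
          (fun (d : PySem.Dict (Char × Char) Int) q => d.insert q (d.getD q 0 + 1)) PySem.Dict.empty := by
    rw [List.foldl_map]
  rw [h, PySem.Dict.getD_foldl_insert_add_one, PySem.Dict.getD_empty]
  simp

-- the two 5×5 swap loops agree pointwise
theorem pv_outer (E : Char → Char → Int) (l1 : List Char) (s : Int) :
    l1.foldl (fun ms o => l1.foldl (fun ms w => if o = w then ms else max ms (E o w)) ms) s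
    = l1.foldl (fun b o => l1.foldl (fun b w => if w ≠ o then max b (E o w) else b) b) s := by
  have inner : ∀ (o : Char) (l2 : List Char) (t : Int),
      l2.foldl (fun ms w => if o = w then ms else max ms (E o w)) t
      = l2.foldl (fun b w => if w ≠ o then max b (E o w) else b) t := by
    intro o l2
    induction l2 with
    | nil => intro t; rfl
    | cons x xs ih =>
      intro t
      simp only [List.foldl_cons, ih]
      by_cases h : o = x
      · simp [h]
      · simp [h, Ne.symm h]
  induction l1 with
  | nil => rfl
  | cons x xs ih => simp only [List.foldl_cons, inner]

-- ===== VERDICT (by name: the statement is the Claim_ definition above) =====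
theorem find_spec : Claim_equal_find := by
  intro n jenny_answers correct_answers _ _
  unfold Spec_find find find_alt
  simp only [pv_pairFold (fun a i => if PySem.List.pyGetD jenny_answers.toList i ' ' = PySem.List.pyGetD correct_answers.toList i ' ' then a + 1 else a)
      (fun d i => d.insert (PySem.List.pyGetD jenny_answers.toList i ' ', PySem.List.pyGetD correct_answers.toList i ' ')
        (d.getD (PySem.List.pyGetD jenny_answers.toList i ' ', PySem.List.pyGetD correct_answers.toList i ' ') 0 + 1))]
  simp only [pv_countTable (fun i => PySem.List.pyGetD jenny_answers.toList i ' ')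
      (fun i => PySem.List.pyGetD correct_answers.toList i ' ')]
  simp only [pv_innerA (fun i => PySem.List.pyGetD jenny_answers.toList i ' ')
      (fun i => PySem.List.pyGetD correct_answers.toList i ' ')]
  exact pv_outer _ _ _
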